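-- pv_equiv track=rewrite | github.com/theferalafk/kauma | bytenigma/util.py | round_rotation
-- ===== SOURCE A (Python) =====
-- def rotation(rotation):
--     result = rotation[1:]
--     carry = rotation[0]
--     result.append(carry)
--     return [result, carry]
--
-- def round_rotation(rotor_array):
--     result = []
--     carried_byte = 0
--     for i in range(len(rotor_array)):
--         if carried_byte == 0:
--             tmp = rotation(rotor_array[i])
--             result.append(tmp[0])
--             carried_byte = tmp[1]
--         else:
--             result.append(rotor_array[i])
--             carried_byte = 1
--     return result
-- ===== SOURCE B (Python) =====
-- def round_rotation(rotor_array):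
--     # Find the boundary: first rotor whose head is nonzero (it still rotates).
--     k = len(rotor_array)
--     for i, r in enumerate(rotor_array):
--         if r[0] != 0:
--             k = i
--             break
--     return [r[1:] + [r[0]] for r in rotor_array[:k + 1]] + rotor_array[k + 1:]
-- ===== Notes on version B (the rewrite author's own statement) =====
-- stated objective: simpler
-- what changed: Replaces A's single stateful carry-propagating loop (accumulator + carried_byte flag) with a find-the-boundary scan followed by rotating the prefix and keeping the tail: the carry state disappears.
import Mathlib
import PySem

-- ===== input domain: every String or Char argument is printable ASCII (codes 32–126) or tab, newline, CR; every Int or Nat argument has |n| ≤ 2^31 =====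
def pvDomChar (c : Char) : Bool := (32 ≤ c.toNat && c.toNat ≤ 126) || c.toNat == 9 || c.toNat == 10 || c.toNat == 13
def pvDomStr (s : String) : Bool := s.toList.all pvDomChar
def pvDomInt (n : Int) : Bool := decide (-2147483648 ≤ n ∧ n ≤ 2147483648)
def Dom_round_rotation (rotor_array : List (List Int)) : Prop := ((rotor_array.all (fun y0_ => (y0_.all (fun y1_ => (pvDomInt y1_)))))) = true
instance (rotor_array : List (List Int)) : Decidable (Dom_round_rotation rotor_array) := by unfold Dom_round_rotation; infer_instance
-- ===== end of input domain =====

-- B replaces A's stateful carry-propagating loop by a find-boundary scan plus rotate-prefix/keep-tail (simpler, same cost).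


-- ===== PORT A =====
-- helper 'rotation': Python returns the heterogeneous list [result, carry]; ported as a pair.
-- 'rotation[0]' raises IndexError on an empty list; that case (unreachable under Pre_) returns junk ([], 0).
def rotationA (r : List Int) : List Int × Int :=
  match r with
  | [] => ([], 0)
  | c :: rest => (rest ++ [c], c)

-- A's 'for i in range(len(rotor_array))' with indexing is the structural recursion over the list,
-- carrying the same state (result accumulator, carried_byte).
def roundLoopA : List (List Int) → List (List Int) → Int → List (List Int)
  | [], result, _ => result
  | r :: rs, result, carried_byte =>
    if carried_byte = 0 then
      let tmp := rotationA r
      roundLoopA rs (result ++ [tmp.1]) tmp.2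
    else
      roundLoopA rs (result ++ [r]) 1

def round_rotation (rotor_array : List (List Int)) : List (List Int) :=
  roundLoopA rotor_array [] 0

-- ===== PORT B =====
-- scan for the first rotor with nonzero head (Python's enumerate/break loop); an empty rotor
-- (where Python raises at r[0]; unreachable under Pre_) is treated as head 0.
def scanK : List (List Int) → Nat
  | [] => 0
  | r :: rs => if r.headD 0 ≠ 0 then 0 else 1 + scanK rs

-- r[1:] + [r[0]]; empty case unreachable under Pre_ (Python raises).
def rotB (r : List Int) : List Int :=
  match r with
  | [] => []
  | c :: rest => rest ++ [c]

def round_rotation_alt (rotor_array : List (List Int)) : List (List Int) :=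
  let k := scanK rotor_array
  (rotor_array.take (k + 1)).map rotB ++ rotor_array.drop (k + 1)

-- ===== PRECONDITION & SPEC =====
-- Pre_ excludes exactly the inputs on which A raises IndexError: an empty rotor encountered
-- while the carry is still 0 (i.e. before or at the first rotor with nonzero head).
def preB : List (List Int) → Bool
  | [] => true
  | r :: rs => !r.isEmpty && (if r.head? = some (0 : Int) then preB rs else true)

def Pre_round_rotation (rotor_array : List (List Int)) : Prop := preB rotor_array = true
instance (rotor_array : List (List Int)) : Decidable (Pre_round_rotation rotor_array) := by
  unfold Pre_round_rotation; infer_instance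

def pvWitness_round_rotation : List (List Int) := [[0, 2], [1, 3], [5]]

def Spec_round_rotation (rotor_array : List (List Int)) (out : List (List Int)) : Prop := out = round_rotation_alt rotor_array
instance (rotor_array : List (List Int)) (out : List (List Int)) : Decidable (Spec_round_rotation rotor_array out) := by unfold Spec_round_rotation; infer_instance

-- ===== CLAIM (what is proved, stated in full; the proofs are below) =====
def Claim_equal_round_rotation : Prop := ∀ (rotor_array : List (List Int)), Dom_round_rotation rotor_array → Pre_round_rotation rotor_array → Spec_round_rotation rotor_array (round_rotation rotor_array)

-- ===== LEMMAS AND PROOFS =====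
theorem roundLoopA_acc (rs : List (List Int)) :
    ∀ (acc : List (List Int)) (c : Int), roundLoopA rs acc c = acc ++ roundLoopA rs [] c := by
  induction rs with
  | nil => intro acc c; simp [roundLoopA]
  | cons r rs ih =>
    intro acc c
    by_cases h : c = 0
    · simp only [roundLoopA, if_pos h]
      rw [ih, ih ([] ++ _)]; simp
    · simp only [roundLoopA, if_neg h]
      rw [ih, ih ([] ++ _)]; simp

theorem roundLoopA_carried (rs : List (List Int)) :
    ∀ (c : Int), c ≠ 0 → roundLoopA rs [] c = rs := by
  induction rs with
  | nil => intro c _; rfl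
  | cons r rs ih =>
    intro c hc
    simp only [roundLoopA, if_neg hc]
    rw [roundLoopA_acc, ih 1 (by norm_num)]
    simp

theorem main_lemma (ra : List (List Int)) (h : preB ra = true) :
    roundLoopA ra [] 0 = round_rotation_alt ra := by
  induction ra with
  | nil => rfl
  | cons r rs ih =>
    simp only [preB, Bool.and_eq_true, Bool.not_eq_true'] at h
    obtain ⟨hne, hrest⟩ := h
    obtain ⟨c, rest, rfl⟩ : ∃ c rest, r = c :: rest := by
      cases r with
      | nil => simp at hne
      | cons c rest => exact ⟨c, rest, rfl⟩
    by_cases hc : c = 0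
    · subst hc
      simp only [List.head?] at hrest
      have ihv := ih (by simpa using hrest)
      simp only [roundLoopA, rotationA]
      rw [roundLoopA_acc, ihv]
      have hk : 1 + scanK rs + 1 = (scanK rs + 1) + 1 := by omega
      simp [round_rotation_alt, scanK, rotB, List.headD, hk]
    · simp only [roundLoopA, rotationA]
      rw [roundLoopA_acc, roundLoopA_carried rs c hc]
      simp [round_rotation_alt, scanK, rotB, List.headD, hc]

-- ===== VERDICT (by name: the statement is the Claim_ definition above) =====
theorem round_rotation_spec : Claim_equal_round_rotation := by
  intro ra _ hpre
  unfold Spec_round_rotation round_rotation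
  exact main_lemma ra hpre
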